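-- pv_equiv track=rewrite | github.com/ssf2xguile/LT4Code-for-MyResearch | LT4Code-main/API_seq_rec/Integration/investigate_lcp_index.py | join_api_methods
-- ===== SOURCE A (Python) =====
-- def join_api_methods(line):
--     parts = line.split(' ')
--     methods = []
--     current_method = []
--     for part in parts:
--         if '.' in part:
--             if current_method:
--                 current_method.append(part)
--                 methods.append(' '.join(current_method))
--                 current_method = []
--             else:
--                 methods.append(part)
--         else:
--             current_method.append(part)
--     return methods
-- ===== SOURCE B (Python) =====
-- def join_api_methods(line):
--     # Recursive decomposition: find first dot-bearing token, emit the slice up to it, recurse on the rest.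
--     def emit(parts):
--         k = 0
--         while k < len(parts) and '.' not in parts[k]:
--             k += 1
--         if k == len(parts):
--             return []
--         return [' '.join(parts[:k + 1])] + emit(parts[k + 1:])
--     return emit(line.split(' '))
-- ===== Notes on version B (the rewrite author's own statement) =====
-- stated objective: alternative
-- what changed: Replaces A's single accumulator loop (pending-token buffer flushed on each dot token) by a recursive decomposition: find the first dot-bearing token, emit the whole slice up to and including it joined by spaces, and recurse on the remaining tokens.
import Mathlib
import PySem

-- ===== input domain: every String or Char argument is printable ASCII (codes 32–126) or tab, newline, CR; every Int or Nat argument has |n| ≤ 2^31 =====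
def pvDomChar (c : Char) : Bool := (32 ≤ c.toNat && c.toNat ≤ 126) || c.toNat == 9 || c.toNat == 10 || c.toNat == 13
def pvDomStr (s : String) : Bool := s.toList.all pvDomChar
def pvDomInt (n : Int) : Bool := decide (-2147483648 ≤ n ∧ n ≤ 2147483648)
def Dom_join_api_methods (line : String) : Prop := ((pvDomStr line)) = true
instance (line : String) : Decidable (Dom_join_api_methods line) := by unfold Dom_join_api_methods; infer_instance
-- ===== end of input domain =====

-- B replaces A's pending-buffer accumulator loop by a recursive "find first dot token, emit slice, recurse" decomposition (alternative, same cost).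


-- ===== PORT A =====
def pvLoopA (ms : List String) (cur : List String) : List String → List String
  | [] => ms
  | p :: rest =>
    if PySem.Str.isIn "." p then
      if cur ≠ [] then
        pvLoopA (ms ++ [PySem.Str.join " " (cur ++ [p])]) [] rest
      else
        pvLoopA (ms ++ [p]) [] rest
    else
      pvLoopA ms (cur ++ [p]) rest

def join_api_methods (line : String) : List String :=
  pvLoopA [] [] ((PySem.Str.split? line " ").getD [])

-- ===== PORT B =====
def pvEmit (parts : List String) : List String :=
  let k := parts.findIdx (fun p => PySem.Str.isIn "." p)
  if h : k < parts.length then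
    PySem.Str.join " " (parts.take (k + 1)) :: pvEmit (parts.drop (k + 1))
  else []
termination_by parts.length
decreasing_by simp only [List.length_drop]; omega

def join_api_methods_alt (line : String) : List String :=
  pvEmit ((PySem.Str.split? line " ").getD [])

-- ===== PRECONDITION & SPEC =====
def Spec_join_api_methods (line : String) (out : List String) : Prop := out = join_api_methods_alt line
instance (line : String) (out : List String) : Decidable (Spec_join_api_methods line out) := by unfold Spec_join_api_methods; infer_instance

-- ===== CLAIM (what is proved, stated in full; the proofs are below) =====
def Claim_equal_join_api_methods : Prop := ∀ (line : String), Dom_join_api_methods line → Spec_join_api_methods line (join_api_methods line)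

-- ===== LEMMAS AND PROOFS =====

-- pvEmit with the pending prefix `cur` of A's loop prepended to the first emitted group
def pvH (cur parts : List String) : List String :=
  let k := parts.findIdx (fun p => PySem.Str.isIn "." p)
  if k < parts.length then
    PySem.Str.join " " (cur ++ parts.take (k + 1)) :: pvEmit (parts.drop (k + 1))
  else []

lemma pvEmit_eq_pvH (ps : List String) : pvEmit ps = pvH [] ps := by
  rw [pvEmit, pvH]
  simp

lemma join_singleton_str (p : String) : PySem.Str.join " " [p] = p := by
  simp [PySem.Str.join]

lemma pvH_cons_nodot (cur : List String) (p : String) (rest : List String)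
    (hd : PySem.Str.isIn "." p = false) :
    pvH cur (p :: rest) = pvH (cur ++ [p]) rest := by
  unfold pvH
  simp only [List.findIdx_cons, hd, cond_false, List.length_cons,
    List.take_succ_cons, List.drop_succ_cons, Nat.add_lt_add_iff_right]
  by_cases h : rest.findIdx (fun q => PySem.Str.isIn "." q) < rest.length
  · simp [List.append_assoc]
  · simp

lemma pvH_cons_dot (cur : List String) (p : String) (rest : List String)
    (hd : PySem.Str.isIn "." p = true) :
    pvH cur (p :: rest) = PySem.Str.join " " (cur ++ [p]) :: pvEmit rest := by
  unfold pvH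
  simp only [List.findIdx_cons, hd, cond_true, List.length_cons,
    List.take_succ_cons, List.take_zero, List.drop_succ_cons, List.drop_zero]
  simp

lemma pvLoopA_eq (ps : List String) : ∀ ms cur, pvLoopA ms cur ps = ms ++ pvH cur ps := by
  induction ps with
  | nil => intro ms cur; simp [pvLoopA, pvH]
  | cons p rest ih =>
    intro ms cur
    by_cases hd : PySem.Str.isIn "." p = true
    · by_cases hc : cur = []
      · subst hc
        rw [pvLoopA]
        simp only [hd, if_true, ne_eq, not_true_eq_false, if_false]
        rw [ih, pvH_cons_dot _ _ _ hd, pvEmit_eq_pvH]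
        simp [join_singleton_str]
      · rw [pvLoopA]
        simp only [hd, if_true, ne_eq, hc, not_false_eq_true, if_true]
        rw [ih, pvH_cons_dot _ _ _ hd, pvEmit_eq_pvH]
        simp
    · have hd' : PySem.Str.isIn "." p = false := by
        cases h : PySem.Str.isIn "." p
        · rfl
        · exact absurd h hd
      rw [pvLoopA]
      simp only [hd', Bool.false_eq_true, if_false]
      rw [ih, pvH_cons_nodot cur p rest hd']

-- ===== VERDICT (by name: the statement is the Claim_ definition above) =====
theorem join_api_methods_spec : Claim_equal_join_api_methods := by
  intro line _
  unfold Spec_join_api_methods join_api_methods join_api_methods_alt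
  rw [pvLoopA_eq, pvEmit_eq_pvH]
  simp
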